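-- pv_equiv track=rewrite | github.com/ghostWood1071/vosint-pipeline | automation/actions/feedaction.py | get_keyword_regex
-- ===== SOURCE A (Python) =====
-- def get_keyword_regex(keyword_dict):
--     pattern = ""
--     for key in list(keyword_dict.keys()):
--         pattern = pattern + keyword_dict.get(key) +","
--     keyword_arr = [keyword.strip() for keyword in pattern.split(",")]
--     keyword_arr = [rf"\b{keyword.strip()}\b" for keyword in list(filter(lambda x: x!="", keyword_arr))]
--     pattern = "|".join(keyword_arr)
--     return pattern
-- ===== SOURCE B (Python) =====
-- def get_keyword_regex(keyword_dict):
--     parts = []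
--     for value in keyword_dict.values():
--         for piece in value.split(","):
--             piece = piece.strip()
--             if piece:
--                 parts.append(rf"\b{piece}\b")
--     return "|".join(parts)
-- ===== Notes on version B (the rewrite author's own statement) =====
-- stated objective: simpler
-- what changed: B drops A's build-one-comma-joined-string-then-re-split round trip: it iterates the dict values directly, splits each value on ',' in place, strips and filters each piece, and appends the wrapped tokens to one list joined at the end.
import Mathlib
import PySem

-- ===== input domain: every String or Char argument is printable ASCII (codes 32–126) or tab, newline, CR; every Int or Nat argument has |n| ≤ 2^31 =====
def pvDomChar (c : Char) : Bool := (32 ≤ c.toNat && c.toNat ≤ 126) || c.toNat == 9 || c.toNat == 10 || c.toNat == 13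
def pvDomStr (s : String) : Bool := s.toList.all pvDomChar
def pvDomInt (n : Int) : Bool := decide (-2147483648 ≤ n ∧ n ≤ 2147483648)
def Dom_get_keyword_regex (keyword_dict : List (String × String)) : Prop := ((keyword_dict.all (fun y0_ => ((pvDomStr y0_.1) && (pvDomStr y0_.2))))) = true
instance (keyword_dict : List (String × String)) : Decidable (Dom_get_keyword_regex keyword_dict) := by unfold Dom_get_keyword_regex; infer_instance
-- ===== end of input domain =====

-- B iterates the dict values directly and flattens split/strip/filter/wrap per value,
-- instead of A's build-one-comma-joined-string-then-re-split round trip (objective: simpler).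

-- ===== PORT A =====
-- str values are handled as List Char throughout (PySem.Chars is the List Char form of Python's str ops).
def get_keyword_regex (keyword_dict : List (String × String)) : String :=
  let d := PySem.Dict.ofList keyword_dict
  -- pattern = ""; for key in list(d.keys()): pattern = pattern + d.get(key) + ","
  -- (key comes from d.keys(), so d.get(key) is never None; its value is (d.get? key).getD "")
  let pattern : List Char :=
    d.keys.foldl (fun p k => p ++ ((d.get? k).getD "").toList ++ [',']) []
  -- keyword_arr = [keyword.strip() for keyword in pattern.split(",")]
  let keyword_arr := (PySem.Chars.splitOn pattern [',']).map PySem.Chars.strip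
  -- keyword_arr = [rf"\b{keyword.strip()}\b" for keyword in filter(lambda x: x != "", keyword_arr)]
  let keyword_arr2 := (keyword_arr.filter (fun x => x ≠ [])).map
      (fun k => ['\\', 'b'] ++ PySem.Chars.strip k ++ ['\\', 'b'])
  -- "|".join(keyword_arr)
  String.ofList (PySem.Chars.join ['|'] keyword_arr2)

-- ===== PORT B =====
def get_keyword_regex_alt (keyword_dict : List (String × String)) : String :=
  let d := PySem.Dict.ofList keyword_dict
  let parts : List (List Char) :=
    d.values.foldl (fun acc v =>
      (PySem.Chars.splitOn v.toList [',']).foldl (fun acc piece =>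
        let p := PySem.Chars.strip piece
        if p = [] then acc else acc ++ [['\\', 'b'] ++ p ++ ['\\', 'b']]) acc) []
  String.ofList (PySem.Chars.join ['|'] parts)

-- ===== PRECONDITION & SPEC =====
def Spec_get_keyword_regex (keyword_dict : List (String × String)) (out : String) : Prop := out = get_keyword_regex_alt keyword_dict
instance (keyword_dict : List (String × String)) (out : String) : Decidable (Spec_get_keyword_regex keyword_dict out) := by unfold Spec_get_keyword_regex; infer_instance

-- ===== CLAIM (what is proved, stated in full; the proofs are below) =====
def Claim_equal_get_keyword_regex : Prop := ∀ (keyword_dict : List (String × String)), Dom_get_keyword_regex keyword_dict → Spec_get_keyword_regex keyword_dict (get_keyword_regex keyword_dict)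

-- ===== LEMMAS AND PROOFS =====

-- A clean structural recursion equal to PySem.Chars.splitOn · [','] (proved below),
-- on which the concatenation law pvSplit_append is easy.
def pvSplit : List Char → List (List Char)
  | [] => [[]]
  | c :: rest =>
      if c = ',' then [] :: pvSplit rest
      else (c :: (pvSplit rest).headI) :: (pvSplit rest).tail

theorem pvSplit_ne_nil (l : List Char) : pvSplit l ≠ [] := by
  cases l with
  | nil => simp [pvSplit]
  | cons c rest => by_cases h : c = ',' <;> simp [pvSplit, h]

theorem pvSplit_cons_headI_tail (l : List Char) :
    (pvSplit l).headI :: (pvSplit l).tail = pvSplit l := by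
  cases h : pvSplit l with
  | nil => exact absurd h (pvSplit_ne_nil l)
  | cons a t => simp

theorem pvSplit_go (fuel : Nat) : ∀ (l cur : List Char) (acc : List (List Char)),
    l.length ≤ fuel →
    PySem.Chars.splitOn.go [','] fuel l cur acc
      = acc.reverse ++ (cur.reverse ++ (pvSplit l).headI) :: (pvSplit l).tail := by
  induction fuel with
  | zero =>
      intro l cur acc hl
      have : l = [] := List.eq_nil_of_length_eq_zero (Nat.le_zero.mp hl)
      subst this
      simp [PySem.Chars.splitOn.go, pvSplit]
  | succ fuel ih =>
      intro l cur acc hl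
      cases l with
      | nil => simp [PySem.Chars.splitOn.go, pvSplit]
      | cons c rest =>
          by_cases hc : c = ','
          · subst hc
            have h1 : PySem.Chars.splitOn.go [','] (fuel + 1) (',' :: rest) cur acc
                = PySem.Chars.splitOn.go [','] fuel rest [] (cur.reverse :: acc) := by
              simp [PySem.Chars.splitOn.go, List.isPrefixOf]
            rw [h1, ih rest [] (cur.reverse :: acc) (by simpa using Nat.lt_succ_iff.mp (by simpa using hl))]
            simp [pvSplit, pvSplit_cons_headI_tail]
          · have h1 : PySem.Chars.splitOn.go [','] (fuel + 1) (c :: rest) cur acc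
                = PySem.Chars.splitOn.go [','] fuel rest (c :: cur) acc := by
              simp [PySem.Chars.splitOn.go, List.isPrefixOf, Ne.symm hc]
            rw [h1, ih rest (c :: cur) acc (by simpa using Nat.lt_succ_iff.mp (by simpa using hl))]
            simp [pvSplit, hc]

theorem splitOn_comma_eq_pvSplit (s : List Char) :
    PySem.Chars.splitOn s [','] = pvSplit s := by
  unfold PySem.Chars.splitOn
  rw [pvSplit_go (s.length + 1) s [] [] (Nat.le_succ _)]
  simpa using pvSplit_cons_headI_tail s

theorem pvSplit_append (a b : List Char) :
    pvSplit (a ++ ',' :: b) = pvSplit a ++ pvSplit b := by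
  induction a with
  | nil => simp [pvSplit]
  | cons c a ih =>
      by_cases hc : c = ','
      · simp [pvSplit, hc, ih]
      · cases h : pvSplit a with
        | nil => exact absurd h (pvSplit_ne_nil a)
        | cons p ps => simp [pvSplit, hc, ih, h]

theorem pvSplit_flat (ws : List (List Char)) :
    pvSplit (ws.flatMap (fun v => v ++ [','])) = ws.flatMap pvSplit ++ [[]] := by
  induction ws with
  | nil => simp [pvSplit]
  | cons w ws ih =>
      have : (w :: ws).flatMap (fun v => v ++ [','])
          = w ++ ',' :: ws.flatMap (fun v => v ++ [',']) := by simp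
      rw [this, pvSplit_append, ih]
      simp

-- strip is idempotent
theorem pv_dropWhile_idem (p : Char → Bool) (l : List Char) :
    List.dropWhile p (List.dropWhile p l) = List.dropWhile p l := by
  induction l with
  | nil => simp
  | cons c t ih =>
      by_cases h : p c <;> simp [h, ih]

theorem pv_dropWhile_of_prefix (p : Char → Bool) (l m : List Char)
    (hp : m <+: l) (h : List.dropWhile p l = l) : List.dropWhile p m = m := by
  cases m with
  | nil => simp
  | cons x xs =>
      obtain ⟨t, ht⟩ := hp
      have hx : p x = false := by
        by_contra hpx
        have hpx' : p x = true := by revert hpx; cases p x <;> simp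
        have := congrArg List.length h
        rw [← ht] at this
        simp [hpx', List.length_append] at this
        have hle := List.length_dropWhile_le p (xs ++ t)
        simp [List.length_append] at hle
        omega
      simp [hx]

theorem pv_strip_idem (s : List Char) :
    PySem.Chars.strip (PySem.Chars.strip s) = PySem.Chars.strip s := by
  show PySem.Chars.rstrip (PySem.Chars.lstrip (PySem.Chars.rstrip (PySem.Chars.lstrip s)))
      = PySem.Chars.rstrip (PySem.Chars.lstrip s)
  set u := PySem.Chars.lstrip s with hu
  have hu' : List.dropWhile PySem.Chars.isspace u = u := by
    rw [hu]; exact pv_dropWhile_idem _ _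
  have hpre : PySem.Chars.rstrip u <+: u := by
    have hs : List.dropWhile PySem.Chars.isspace u.reverse <:+ u.reverse :=
      List.dropWhile_suffix _
    have := List.reverse_prefix.mpr hs
    simpa [PySem.Chars.rstrip] using this
  have h1 : PySem.Chars.lstrip (PySem.Chars.rstrip u) = PySem.Chars.rstrip u :=
    pv_dropWhile_of_prefix _ _ _ hpre hu'
  rw [h1]
  show (List.dropWhile _ (PySem.Chars.rstrip u).reverse).reverse = _
  simp [PySem.Chars.rstrip, pv_dropWhile_idem]

theorem pv_strip_nil : PySem.Chars.strip ([] : List Char) = [] := rfl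

-- B's inner loop over the pieces of one value
theorem pv_innerB (pieces : List (List Char)) : ∀ acc : List (List Char),
    pieces.foldl (fun acc piece =>
        let p := PySem.Chars.strip piece
        if p = [] then acc else acc ++ [['\\', 'b'] ++ p ++ ['\\', 'b']]) acc
      = acc ++ ((pieces.map PySem.Chars.strip).filter (fun x => x ≠ [])).map
          (fun k => ['\\', 'b'] ++ k ++ ['\\', 'b']) := by
  induction pieces with
  | nil => intro acc; simp
  | cons piece rest ih =>
      intro acc
      rw [List.foldl_cons, ih]
      by_cases h : PySem.Chars.strip piece = [] <;> simp [h]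

-- B's outer loop over the values
theorem pv_outerB (vs : List String) : ∀ acc : List (List Char),
    vs.foldl (fun acc v =>
      (PySem.Chars.splitOn v.toList [',']).foldl (fun acc piece =>
        let p := PySem.Chars.strip piece
        if p = [] then acc else acc ++ [['\\', 'b'] ++ p ++ ['\\', 'b']]) acc) acc
    = acc ++ vs.flatMap (fun v =>
        (((pvSplit v.toList).map PySem.Chars.strip).filter (fun x => x ≠ [])).map
          (fun k => ['\\', 'b'] ++ k ++ ['\\', 'b'])) := by
  induction vs with
  | nil => intro acc; simp
  | cons v rest ih =>
      intro acc
      rw [List.foldl_cons, pv_innerB, ih, splitOn_comma_eq_pvSplit]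
      simp

-- ===== VERDICT (by name: the statement is the Claim_ definition above) =====
theorem get_keyword_regex_spec : Claim_equal_get_keyword_regex := by
  intro kd _
  unfold Spec_get_keyword_regex
  simp only [get_keyword_regex, get_keyword_regex_alt]
  set d := PySem.Dict.ofList kd with hd
  have hvals : d.values = d.keys.map (fun k => (d.get? k).getD "") := by
    rw [PySem.Dict.values_eq_map_keys d (PySem.Dict.nodup_keys_ofList kd) ""]
    simp [PySem.Dict.getD_eq_get?_getD]
  have hstep : (fun (p : List Char) k => p ++ ((d.get? k).getD "").toList ++ [','])
      = fun p k => p ++ (((d.get? k).getD "").toList ++ [',']) := by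
    funext p k; simp
  have hpattern :
      d.keys.foldl (fun p k => p ++ ((d.get? k).getD "").toList ++ [',']) []
        = (d.values.map String.toList).flatMap (fun w => w ++ [',']) := by
    rw [hstep, PySem.List.foldl_append_eq_flatMap, hvals]
    simp [List.flatMap_map, List.map_map, Function.comp]
  have hwrap : ∀ w : List Char,
      (((pvSplit w).map PySem.Chars.strip).filter (fun x => x ≠ [])).map
        (fun k => ['\\', 'b'] ++ PySem.Chars.strip k ++ ['\\', 'b'])
      = (((pvSplit w).map PySem.Chars.strip).filter (fun x => x ≠ [])).map
        (fun k => ['\\', 'b'] ++ k ++ ['\\', 'b']) := by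
    intro w
    apply List.map_congr_left
    intro k hk
    have hk' : k ∈ (pvSplit w).map PySem.Chars.strip := List.mem_of_mem_filter hk
    obtain ⟨q, -, rfl⟩ := List.mem_map.mp hk'
    rw [pv_strip_idem]
  rw [hpattern, pv_outerB, splitOn_comma_eq_pvSplit, pvSplit_flat, List.nil_append]
  congr 1
  congr 1
  rw [List.map_append, List.filter_append]
  simp only [List.map_cons, List.map_nil, pv_strip_nil]
  rw [show List.filter (fun x => decide (x ≠ [])) [([] : List Char)] = [] from by simp,
      List.append_nil]
  rw [List.map_flatMap, List.filter_flatMap, List.map_flatMap, List.flatMap_map]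
  simp only [hwrap]
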